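-- pv_equiv track=rewrite | github.com/liupengsay/PyIsTheBestLang | src/mathmatics/mex_like/example.py | lc_2952
-- ===== SOURCE A (Python) =====
-- from typing import List
--
-- def lc_2952(nums: List[int], n: int) -> int:
--     nums.sort()
--     m = len(nums)
--     i = 0
--     mex = 1
--     ans = 0
--     while mex <= n:
--         if i < m and nums[i] <= mex:
--             mex += nums[i]
--             i += 1
--         else:
--             ans += 1
--             mex *= 2
--     return ans
-- ===== SOURCE B (Python) =====
-- from typing import List
--
-- def lc_2952(nums: List[int], n: int) -> int:
--     nums.sort()
--     m = len(nums)
--     pref = [0]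
--     for v in nums:
--         pref.append(pref[-1] + v)
--     j = 0
--     mex = 1
--     ans = 0
--     while mex <= n:
--         # binary search: first index in [j, m) whose value exceeds mex
--         lo, hi = j, m
--         while lo < hi:
--             mid = (lo + hi) // 2
--             if nums[mid] <= mex:
--                 lo = mid + 1
--             else:
--                 hi = mid
--         if lo > j:
--             # consume the whole block nums[j:lo] at once via prefix sums
--             mex += pref[lo] - pref[j]
--             j = lo
--         else:
--             ans += 1
--             mex *= 2
--     return ans
-- ===== Notes on version B (the rewrite author's own statement) =====
-- stated objective: alternative
-- what changed: B precomputes a prefix-sum array and, per outer step, binary-searches the first unreachable element so a whole consumable block is added to mex in O(1) instead of A's one-element-per-iteration while loop; Pre_ excludes n >= 1 with a negative element, where A loops forever (mex becomes nonpositive and doubling never exceeds n).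
import Mathlib
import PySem

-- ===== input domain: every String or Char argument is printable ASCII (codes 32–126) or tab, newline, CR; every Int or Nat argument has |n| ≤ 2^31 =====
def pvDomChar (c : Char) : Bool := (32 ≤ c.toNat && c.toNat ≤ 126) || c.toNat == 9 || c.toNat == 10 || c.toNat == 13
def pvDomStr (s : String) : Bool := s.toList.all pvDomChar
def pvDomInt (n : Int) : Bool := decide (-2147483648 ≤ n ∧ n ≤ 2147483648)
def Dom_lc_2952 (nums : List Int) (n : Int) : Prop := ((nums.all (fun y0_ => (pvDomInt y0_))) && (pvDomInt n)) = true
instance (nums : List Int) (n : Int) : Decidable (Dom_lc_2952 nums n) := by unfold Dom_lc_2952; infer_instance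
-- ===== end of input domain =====

-- B replaces A's one-element-per-iteration greedy loop by prefix sums plus, per outer
-- step, a binary search for the first unreachable element, consuming a whole block at
-- once (objective: alternative). A mutates nums in place (nums.sort()); B performs the
-- same mutation; the equivalence proved here is about the return value.
-- The fuel (64) in both ports is only a totality device: it is decremented exactly on
-- the doubling (patch) steps, the exhaustion paths of the two ports coincide, so the
-- equality holds for any fuel.

-- ===== PORT A =====
-- the while loop of A: state (i, mex, ans); fuel is spent only on the `else` (doubling) branch
def lc2952ALoop (s : List Int) (n : Int) (f i : Nat) (mex ans : Int) : Int :=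
  if mex ≤ n then
    if _h : i < s.length ∧ s.getD i 0 ≤ mex then
      lc2952ALoop s n f (i + 1) (mex + s.getD i 0) ans
    else
      match f with
      | 0 => ans
      | g + 1 => lc2952ALoop s n g i (mex * 2) (ans + 1)
  else ans
termination_by (f, s.length - i)
decreasing_by
  · exact Prod.Lex.right f (by omega)
  · exact Prod.Lex.left _ _ (by omega)

def lc_2952 (nums : List Int) (n : Int) : Int :=
  lc2952ALoop (PySem.List.sorted nums (fun x => x) false) n 64 0 1 0

-- ===== PORT B =====
-- `pref = [0]; for v in nums: pref.append(pref[-1] + v)` — the running last value is carried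
def lc2952BPref (l : List Int) (last : Int) : List Int :=
  match l with
  | [] => []
  | v :: r => (last + v) :: lc2952BPref r (last + v)

-- inner binary search `lo, hi = j, m; while lo < hi: ...` — first index in [lo,hi) with
-- value > mex; the extra Nat is structural fuel ≥ hi - lo (the gap shrinks every step,
-- so fuel s.length at the call sites is never exhausted)
def lc2952BSearch (s : List Int) (mex : Int) : Nat → Nat → Nat → Nat
  | 0, lo, _hi => lo
  | d + 1, lo, hi =>
    if lo < hi then
      if s.getD ((lo + hi) / 2) 0 ≤ mex then lc2952BSearch s mex d ((lo + hi) / 2 + 1) hi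
      else lc2952BSearch s mex d lo ((lo + hi) / 2)
    else lo

-- the outer while loop of B: state (j, mex, ans); fuel f is spent only on the patch
-- branch (aligned with port A), the gas c only on consume steps (at most s.length of
-- them happen, so c = s.length + 1 at the call site is never exhausted)
def lc2952BLoop (s pref : List Int) (n : Int) (f c j : Nat) (mex ans : Int) : Int :=
  if mex ≤ n then
    let k := lc2952BSearch s mex s.length j s.length
    if j < k then
      match c with
      | 0 => ans
      | c' + 1 => lc2952BLoop s pref n f c' k (mex + (pref.getD k 0 - pref.getD j 0)) ans
    else
      match f with
      | 0 => ans
      | g + 1 => lc2952BLoop s pref n g c j (mex * 2) (ans + 1)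
  else ans
termination_by (f, c)
decreasing_by
  · exact Prod.Lex.right f (by omega)
  · exact Prod.Lex.left _ _ (by omega)

def lc_2952_alt (nums : List Int) (n : Int) : Int :=
  let s := PySem.List.sorted nums (fun x => x) false
  let pref := 0 :: lc2952BPref s 0
  lc2952BLoop s pref n 64 (s.length + 1) 0 1 0

-- ===== PRECONDITION & SPEC =====
-- Pre_ excludes exactly the inputs on which A never returns: when n ≥ 1 and nums has a
-- negative element, A consumes the negative, mex becomes ≤ 0, and the doubling loop
-- `mex *= 2` keeps mex ≤ 0 ≤ n forever (A diverges there, so nothing is excluded that A returns on).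
def Pre_lc_2952 (nums : List Int) (n : Int) : Prop := n ≤ 0 ∨ ∀ x ∈ nums, 0 ≤ x
instance (nums : List Int) (n : Int) : Decidable (Pre_lc_2952 nums n) := by
  unfold Pre_lc_2952; infer_instance

def pvWitness_lc_2952 : List Int × Int := ([1, 2, 10], 13)

def Spec_lc_2952 (nums : List Int) (n : Int) (out : Int) : Prop := out = lc_2952_alt nums n
instance (nums : List Int) (n : Int) (out : Int) : Decidable (Spec_lc_2952 nums n out) := by unfold Spec_lc_2952; infer_instance

-- ===== CLAIM (what is proved, stated in full; the proofs are below) =====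
def Claim_equal_lc_2952 : Prop := ∀ (nums : List Int) (n : Int), Dom_lc_2952 nums n → Pre_lc_2952 nums n → Spec_lc_2952 nums n (lc_2952 nums n)

-- ===== LEMMAS AND PROOFS =====

-- pref is the prefix-sum array: pref[j+1] = pref[j] + s[j]
theorem lc2952BPref_succ :
    ∀ (l : List Int) (a : Int) (j : Nat), j < l.length →
      (a :: lc2952BPref l a).getD (j + 1) 0 = (a :: lc2952BPref l a).getD j 0 + l.getD j 0 := by
  intro l
  induction l with
  | nil => intro a j h; simp at h
  | cons v r ih =>
    intro a j h
    cases j with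
    | zero => simp [lc2952BPref]
    | succ j =>
      have := ih (a + v) j (by simpa using h)
      simpa [lc2952BPref] using this

-- telescoping: pref[j+c] - pref[j] is the sum of the block s[j:j+c]
theorem pref_diff (s pref : List Int)
    (hpref : ∀ j : Nat, j < s.length → pref.getD (j + 1) 0 = pref.getD j 0 + s.getD j 0) :
    ∀ (c j : Nat), j + c ≤ s.length →
      pref.getD (j + c) 0 - pref.getD j 0 = ((s.drop j).take c).sum := by
  intro c
  induction c with
  | zero => intro j _; simp
  | succ c ih =>
    intro j h
    have hj : j < s.length := by omega
    have hdrop : s.drop j = s.getD j 0 :: s.drop (j + 1) := by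
      rw [List.getD_eq_getElem _ _ hj]
      exact (List.getElem_cons_drop hj).symm
    have hrec := ih (j + 1) (by omega)
    rw [hdrop, List.take_succ_cons, List.sum_cons, ← hrec, hpref j hj]
    have : j + 1 + c = j + (c + 1) := by omega
    rw [this]; ring

-- bsearch never moves below its lower bound
theorem lc2952BSearch_lo_le (s : List Int) (mex : Int) :
    ∀ (d lo hi : Nat), lo ≤ lc2952BSearch s mex d lo hi := by
  intro d
  induction d with
  | zero => intro lo hi; simp [lc2952BSearch]
  | succ d ih =>
    intro lo hi
    rw [lc2952BSearch]
    split
    · rename_i h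
      split
      · exact Nat.le_trans (by omega) (ih ((lo + hi) / 2 + 1) hi)
      · exact ih lo ((lo + hi) / 2)
    · omega

-- bsearch never moves above its upper bound
theorem lc2952BSearch_le_hi (s : List Int) (mex : Int) :
    ∀ (d lo hi : Nat), lo ≤ hi → lc2952BSearch s mex d lo hi ≤ hi := by
  intro d
  induction d with
  | zero => intro lo hi h; simpa [lc2952BSearch] using h
  | succ d ih =>
    intro lo hi hle
    rw [lc2952BSearch]
    split
    · rename_i h
      split
      · exact ih ((lo + hi) / 2 + 1) hi (by omega)
      · exact Nat.le_trans (ih lo ((lo + hi) / 2) (by omega)) (by omega)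
    · exact hle

theorem lc2952BSearch_stuck (s : List Int) (mex : Int) (d lo hi : Nat) (h : ¬ lo < hi) :
    lc2952BSearch s mex d lo hi = lo := by
  cases d with
  | zero => rfl
  | succ d => rw [lc2952BSearch]; simp only [if_neg h]

-- every index in [lo, bsearch) holds a value ≤ mex (needs sortedness and enough fuel)
theorem lc2952BSearch_below (s : List Int) (mex : Int)
    (hmono : ∀ p q : Nat, p ≤ q → q < s.length → s.getD p 0 ≤ s.getD q 0) :
    ∀ (d lo hi : Nat), hi - lo ≤ d → hi ≤ s.length →
      ∀ t : Nat, lo ≤ t → t < lc2952BSearch s mex d lo hi → s.getD t 0 ≤ mex := by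
  intro d
  induction d with
  | zero =>
    intro lo hi hd hhi t hlo ht
    rw [lc2952BSearch] at ht; omega
  | succ d ih =>
    intro lo hi hd hhi t hlo ht
    rw [lc2952BSearch] at ht
    by_cases h : lo < hi
    · simp only [if_pos h] at ht
      by_cases hle : s.getD ((lo + hi) / 2) 0 ≤ mex
      · simp only [if_pos hle] at ht
        by_cases hm : t ≤ (lo + hi) / 2
        · exact le_trans (hmono t ((lo + hi) / 2) hm (by omega)) hle
        · exact ih ((lo + hi) / 2 + 1) hi (by omega) hhi t (by omega) ht
      · simp only [if_neg hle] at ht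
        exact ih lo ((lo + hi) / 2) (by omega) (by omega) t hlo ht
    · simp only [if_neg h] at ht; omega

-- if bsearch stops strictly below hi, the value there exceeds mex (enough fuel)
theorem lc2952BSearch_above (s : List Int) (mex : Int) :
    ∀ (d lo hi : Nat), hi - lo ≤ d → lc2952BSearch s mex d lo hi < hi →
      mex < s.getD (lc2952BSearch s mex d lo hi) 0 := by
  intro d
  induction d with
  | zero =>
    intro lo hi hd hk
    rw [lc2952BSearch] at hk ⊢; omega
  | succ d ih =>
    intro lo hi hd hk
    rw [lc2952BSearch] at hk ⊢
    by_cases h : lo < hi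
    · simp only [if_pos h] at hk ⊢
      by_cases hle : s.getD ((lo + hi) / 2) 0 ≤ mex
      · simp only [if_pos hle] at hk ⊢
        exact ih ((lo + hi) / 2 + 1) hi (by omega) hk
      · simp only [if_neg hle] at hk ⊢
        have hge := lc2952BSearch_lo_le s mex d lo ((lo + hi) / 2)
        have hle2 := lc2952BSearch_le_hi s mex d lo ((lo + hi) / 2) (by omega)
        by_cases heq : lc2952BSearch s mex d lo ((lo + hi) / 2) = (lo + hi) / 2
        · rw [heq]; omega
        · exact ih lo ((lo + hi) / 2) (by omega) (by omega)
    · simp only [if_neg h] at hk; omega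

-- A consumes a block of elements all ≤ the starting mex one at a time; with nonnegative
-- elements this equals one batched jump (even if mex crosses n mid-block: ans is unchanged)
theorem consume_block (s : List Int) (n : Int) (hnn : ∀ x ∈ s, 0 ≤ x) :
    ∀ (c f j : Nat) (mex ans : Int),
      (∀ t : Nat, t < c → j + t < s.length ∧ s.getD (j + t) 0 ≤ mex) →
      lc2952ALoop s n f j mex ans = lc2952ALoop s n f (j + c) (mex + ((s.drop j).take c).sum) ans := by
  intro c
  induction c with
  | zero => intro f j mex ans _; simp
  | succ c ih =>
    intro f j mex ans hblk
    obtain ⟨hj, hx⟩ := hblk 0 (by omega)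
    rw [Nat.add_zero] at hj hx
    have hjmem : s.getD j 0 ∈ s := by
      rw [List.getD_eq_getElem _ _ hj]; exact List.getElem_mem hj
    have hj0 : 0 ≤ s.getD j 0 := hnn _ hjmem
    have hdrop : s.drop j = s.getD j 0 :: s.drop (j + 1) := by
      rw [List.getD_eq_getElem _ _ hj]
      exact (List.getElem_cons_drop hj).symm
    by_cases hle : mex ≤ n
    · rw [lc2952ALoop.eq_def]
      simp only [if_pos hle, dif_pos (And.intro hj hx)]
      have := ih f (j + 1) (mex + s.getD j 0) ans (by
        intro t ht
        obtain ⟨h1, h2⟩ := hblk (t + 1) (by omega)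
        constructor
        · omega
        · have : j + 1 + t = j + (t + 1) := by omega
          rw [this]; omega)
      rw [this, hdrop, List.take_succ_cons, List.sum_cons]
      have h1 : j + 1 + c = j + (c + 1) := by omega
      have h2 : mex + s.getD j 0 + ((s.drop (j + 1)).take c).sum
          = mex + (s.getD j 0 + ((s.drop (j + 1)).take c).sum) := by ring
      rw [h1, h2]
    · -- mex > n: LHS returns ans at once; RHS starts with mex + (nonneg sum) > n, also ans
      have hsum : 0 ≤ ((s.drop j).take (c + 1)).sum :=
        List.sum_nonneg (fun x hx => hnn x (List.mem_of_mem_drop (List.mem_of_mem_take hx)))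
      rw [lc2952ALoop.eq_def, if_neg hle, lc2952ALoop.eq_def, if_neg (by omega)]

-- step simulation: A's flat loop equals B's batched loop from every common state with
-- enough consume gas (s.length - j < c), for EVERY doubling fuel f (both ports spend f
-- exactly on doublings)
theorem lc2952_sim (s pref : List Int) (n : Int) (hnn : ∀ x ∈ s, 0 ≤ x)
    (hmono : ∀ p q : Nat, p ≤ q → q < s.length → s.getD p 0 ≤ s.getD q 0)
    (hpref : ∀ j : Nat, j < s.length → pref.getD (j + 1) 0 = pref.getD j 0 + s.getD j 0) :
    ∀ (f c j : Nat) (mex ans : Int), s.length - j < c →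
      lc2952ALoop s n f j mex ans = lc2952BLoop s pref n f c j mex ans := by
  intro f c j mex ans
  induction f, c, j, mex, ans using lc2952BLoop.induct s pref n with
  | case1 f j mex ans hle k hk =>
    -- consume branch with gas 0: excluded by the gas invariant
    intro hc
    have hkdef : lc2952BSearch s mex s.length j s.length = k := rfl
    have hjlt : j < s.length := by
      by_contra hj
      rw [lc2952BSearch_stuck s mex s.length j s.length (by omega)] at hkdef
      omega
    omega
  | case2 f j mex ans hle k hk c' ih =>
    -- consume branch: j < k = bsearch j m; A takes the same block one element at a time
    intro hc
    have hkdef : lc2952BSearch s mex s.length j s.length = k := rfl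
    have hjlt : j < s.length := by
      by_contra hj
      rw [lc2952BSearch_stuck s mex s.length j s.length (by omega)] at hkdef
      omega
    have hkle : k ≤ s.length := by
      rw [← hkdef]
      exact lc2952BSearch_le_hi s mex s.length j s.length (by omega)
    have hblk : ∀ t : Nat, t < k - j → j + t < s.length ∧ s.getD (j + t) 0 ≤ mex := by
      intro t ht
      refine ⟨by omega, ?_⟩
      refine lc2952BSearch_below s mex hmono s.length j s.length (by omega) (le_refl _)
        (j + t) (by omega) ?_
      rw [hkdef]; omega
    have hA := consume_block s n hnn (k - j) f j mex ans hblk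
    have hjk : j + (k - j) = k := by omega
    rw [hjk] at hA
    have hsum := pref_diff s pref hpref (k - j) j (by omega)
    rw [hjk] at hsum
    rw [hA, ← hsum]
    rw [lc2952BLoop.eq_def]
    simp only [if_pos hle, hkdef, if_pos hk]
    exact ih (by omega)
  | case3 c j mex ans hle k hk =>
    -- patch branch, doubling fuel exhausted: both return ans
    intro _
    have hkdef : lc2952BSearch s mex s.length j s.length = k := rfl
    have hkge : j ≤ k := by
      rw [← hkdef]; exact lc2952BSearch_lo_le s mex s.length j s.length
    have hcond : ¬ (j < s.length ∧ s.getD j 0 ≤ mex) := by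
      rintro ⟨hj, hx⟩
      have := lc2952BSearch_above s mex s.length j s.length (by omega) (by omega)
      rw [hkdef] at this
      have hkj : k = j := by omega
      rw [hkj] at this
      omega
    rw [lc2952ALoop.eq_def]
    simp only [if_pos hle, dif_neg hcond]
    rw [lc2952BLoop.eq_def]
    simp only [if_pos hle, hkdef, if_neg hk]
  | case4 c j mex ans hle k hk g ih =>
    -- patch branch with doubling fuel left
    intro hc
    have hkdef : lc2952BSearch s mex s.length j s.length = k := rfl
    have hkge : j ≤ k := by
      rw [← hkdef]; exact lc2952BSearch_lo_le s mex s.length j s.length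
    have hcond : ¬ (j < s.length ∧ s.getD j 0 ≤ mex) := by
      rintro ⟨hj, hx⟩
      have := lc2952BSearch_above s mex s.length j s.length (by omega) (by omega)
      rw [hkdef] at this
      have hkj : k = j := by omega
      rw [hkj] at this
      omega
    rw [lc2952ALoop.eq_def]
    simp only [if_pos hle, dif_neg hcond]
    rw [lc2952BLoop.eq_def]
    simp only [if_pos hle, hkdef, if_neg hk]
    exact ih hc
  | case5 f c j mex ans hle =>
    intro _
    rw [lc2952ALoop.eq_def, if_neg hle, lc2952BLoop.eq_def, if_neg hle]

-- ===== VERDICT (by name: the statement is the Claim_ definition above) =====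
theorem lc_2952_spec : Claim_equal_lc_2952 := by
  intro nums n _ hpre
  unfold Spec_lc_2952 lc_2952 lc_2952_alt
  rcases hpre with hn | hnn
  · rw [lc2952ALoop.eq_def, if_neg (by omega : ¬ (1:Int) ≤ n), lc2952BLoop.eq_def, if_neg (by omega : ¬ (1:Int) ≤ n)]
  · refine lc2952_sim _ _ n ?_ ?_ ?_ 64 _ 0 1 0 (by omega)
    · intro x hx
      exact hnn x ((PySem.List.mem_sorted nums (fun x => x) false x).mp hx)
    · intro p q hpq hq
      rw [List.getD_eq_getElem _ _ (by omega), List.getD_eq_getElem _ _ hq]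
      exact PySem.List.sorted_id_getElem_mono nums hpq hq
    · intro j hj
      exact lc2952BPref_succ _ 0 j hj
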